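-- pv_equiv track=rewrite | github.com/GitUpA/Holdem-Vision | data/solver/batch_turn_river.py | find_unused_suit
-- ===== SOURCE A (Python) =====
-- SUITS = ['c','d','h','s']
--
-- def card_suit(card):
--     return card[1]
--
-- def find_unused_suit(flop, prefer_new=True):
--     """Find a suit not used on the board, or least-used suit."""
--     used = [card_suit(c) for c in flop]
--     unused = [s for s in SUITS if s not in used]
--     if unused:
--         return unused[0]
--     # All suits used (shouldn't happen with 3-card flop), return least common
--     from collections import Counter
--     counts = Counter(used)
--     return min(SUITS, key=lambda s: counts.get(s, 0))
-- ===== SOURCE B (Python) =====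
-- SUITS = ['c','d','h','s']
--
-- def find_unused_suit(flop, prefer_new=True):
--     """Explicit scan over SUITS keeping the least-used suit seen so far;
--     returns immediately on a suit absent from the board."""
--     best = None
--     best_n = None
--     for s in SUITS:
--         n = sum(1 for card in flop if card[1] == s)
--         if n == 0:
--             return s
--         if best_n is None or n < best_n:
--             best, best_n = s, n
--     return best
-- ===== Notes on version B (the rewrite author's own statement) =====
-- stated objective: simpler
-- what changed: A builds a 'used' list, a filtered 'unused' list with an early-return branch, then falls back to Counter+min; B is one explicit accumulator loop over SUITS that counts each suit's occurrences on the board directly and keeps the first least-used suit, returning immediately when a suit's count is 0 - no membership list, no Counter, no min, no branch structure.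
import Mathlib
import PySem

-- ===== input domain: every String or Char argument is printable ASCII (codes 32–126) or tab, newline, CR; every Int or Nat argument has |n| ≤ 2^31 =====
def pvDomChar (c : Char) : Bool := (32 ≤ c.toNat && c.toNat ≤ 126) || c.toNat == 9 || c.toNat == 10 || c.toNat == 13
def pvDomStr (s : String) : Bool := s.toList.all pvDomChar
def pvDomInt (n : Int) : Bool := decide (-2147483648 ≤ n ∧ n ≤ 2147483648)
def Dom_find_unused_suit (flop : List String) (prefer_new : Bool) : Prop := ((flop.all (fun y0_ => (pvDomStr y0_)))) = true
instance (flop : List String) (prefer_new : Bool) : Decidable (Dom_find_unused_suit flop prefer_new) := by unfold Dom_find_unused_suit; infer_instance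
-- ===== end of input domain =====

-- B replaces A's unused-list/early-return + Counter+min structure by one explicit
-- accumulator loop over SUITS that counts each suit on the board directly (simpler).

-- ===== PORT A =====
def pvSUITS : List String := ["c", "d", "h", "s"]

def pvCardSuit (card : String) : String :=
  -- card[1]; IndexError (none) is excluded by Pre_
  match PySem.Str.pyGet? card 1 with
  | some c => String.ofList [c]
  | none => ""

def find_unused_suit (flop : List String) (prefer_new : Bool) : String :=
  let used := flop.map pvCardSuit
  let unused := pvSUITS.filter (fun s => !used.contains s)
  match unused with
  | u :: _ => u
  | [] =>
    let counts := PySem.Dict.counter used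
    (PySem.List.min? pvSUITS (fun s => counts.getD s 0)).getD ""

-- ===== PORT B =====
-- n = sum(1 for card in flop if card[1] == s)
def pvAltCount (flop : List String) (s : String) : Int :=
  flop.foldl (fun n card =>
    if (match PySem.Str.pyGet? card 1 with | some c => String.ofList [c] | none => "") = s
    then n + 1 else n) 0

-- the 'for s in SUITS' loop with accumulator (best, best_n); early return on n == 0
def pvAltScan (flop : List String) : List String → Option (String × Int) → String
  | [], acc => (acc.map Prod.fst).getD ""   -- 'return best' ('None' unreachable: SUITS is nonempty)
  | s :: rest, acc =>
    let n := pvAltCount flop s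
    if n = 0 then s
    else
      match acc with
      | none => pvAltScan flop rest (some (s, n))
      | some (b, bn) =>
        if n < bn then pvAltScan flop rest (some (s, n)) else pvAltScan flop rest (some (b, bn))

def find_unused_suit_alt (flop : List String) (prefer_new : Bool) : String :=
  pvAltScan flop pvSUITS none

-- ===== PRECONDITION & SPEC =====
-- Pre_ excludes exactly the inputs where A raises IndexError: a card shorter than 2 characters.
def Pre_find_unused_suit (flop : List String) (prefer_new : Bool) : Prop :=
  ∀ c ∈ flop, 2 ≤ c.toList.length
instance (flop : List String) (prefer_new : Bool) : Decidable (Pre_find_unused_suit flop prefer_new) := by unfold Pre_find_unused_suit; infer_instance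

def pvWitness_find_unused_suit : List String × Bool := (["Ac", "Kd", "7c"], true)

def Spec_find_unused_suit (flop : List String) (prefer_new : Bool) (out : String) : Prop := out = find_unused_suit_alt flop prefer_new
instance (flop : List String) (prefer_new : Bool) (out : String) : Decidable (Spec_find_unused_suit flop prefer_new out) := by unfold Spec_find_unused_suit; infer_instance

-- ===== CLAIM (what is proved, stated in full; the proofs are below) =====
def Claim_equal_find_unused_suit : Prop := ∀ (flop : List String) (prefer_new : Bool), Dom_find_unused_suit flop prefer_new → Pre_find_unused_suit flop prefer_new → Spec_find_unused_suit flop prefer_new (find_unused_suit flop prefer_new)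

-- ===== LEMMAS AND PROOFS =====

-- B's per-suit counting loop counts occurrences of s among the cards' suits.
lemma pv_count_go (t : List String) (s : String) (a : Int) :
    t.foldl (fun n card => if pvCardSuit card = s then n + 1 else n) a
      = a + ((t.map pvCardSuit).count s : Int) := by
  induction t generalizing a with
  | nil => simp
  | cons x r ih =>
    rw [List.foldl_cons, ih]
    by_cases h : pvCardSuit x = s <;> simp [h] <;> push_cast <;> omega

lemma pvAltCount_eq (flop : List String) (s : String) :
    pvAltCount flop s = ((flop.map pvCardSuit).count s : Int) := by
  simpa using pv_count_go flop s 0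

-- The heart: A's two-branch structure agrees with B's single accumulator scan,
-- by cases on which of the four suits occur among the board's suits.
lemma pv_main (flop : List String) (prefer_new : Bool) :
    find_unused_suit flop prefer_new = find_unused_suit_alt flop prefer_new := by
  unfold find_unused_suit find_unused_suit_alt
  have hk : ∀ s, (PySem.Dict.counter (flop.map pvCardSuit)).getD s 0
      = ((flop.map pvCardSuit).count s : Int) :=
    fun s => PySem.Dict.getD_counter (flop.map pvCardSuit) s
  simp only [pvSUITS, pvAltScan, pvAltCount_eq, hk]
  generalize (List.map pvCardSuit flop) = used
  by_cases hc : "c" ∈ used <;> by_cases hd : "d" ∈ used <;>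
    by_cases hh : "h" ∈ used <;> by_cases hs : "s" ∈ used <;>
  · try have fc0 : used.count "c" = 0 := List.count_eq_zero_of_not_mem hc
    try have fd0 : used.count "d" = 0 := List.count_eq_zero_of_not_mem hd
    try have fh0 : used.count "h" = 0 := List.count_eq_zero_of_not_mem hh
    try have fs0 : used.count "s" = 0 := List.count_eq_zero_of_not_mem hs
    try have fc1 : used.count "c" ≠ 0 := (List.count_pos_iff.mpr hc).ne'
    try have fd1 : used.count "d" ≠ 0 := (List.count_pos_iff.mpr hd).ne'
    try have fh1 : used.count "h" ≠ 0 := (List.count_pos_iff.mpr hh).ne'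
    try have fs1 : used.count "s" ≠ 0 := (List.count_pos_iff.mpr hs).ne'
    simp [PySem.List.min?, List.foldl, List.filter, hc, hd, hh, hs, *]
    repeat' first
      | rfl
      | omega
      | (split_ifs <;> simp_all <;> try omega)

-- ===== VERDICT (by name: the statement is the Claim_ definition above) =====
theorem find_unused_suit_spec : Claim_equal_find_unused_suit := by
  intro flop prefer_new _ _
  exact pv_main flop prefer_new
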